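-- pv_equiv track=rewrite | github.com/yiulau/all_code | abstract/deprecated_code/abstract_adapt_util_deprecated.py | return_update_metric_ep_list
-- ===== SOURCE A (Python) =====
-- def return_update_metric_ep_list(tune_l,ini_buffer=75,end_buffer=50,window_size=25):
--     # returns indices at which the chain ends a covariance update window and also updates epsilon once
--     if tune_l < ini_buffer + end_buffer + window_size:
--         return("error")
--     else:
--         cur_window_size = window_size
--         counter = ini_buffer
--         overshoots = False
--         output_list = []
--         while not overshoots:
--             counter = counter + cur_window_size
--             cur_window_size = cur_window_size * 2
--             overshoots = counter >= tune_l - end_buffer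
--             if overshoots:
--                 output_list.append(tune_l-end_buffer-1)
--             else:
--                 output_list.append(counter-1)
--     return(output_list)
-- ===== SOURCE B (Python) =====
-- def return_update_metric_ep_list(tune_l, ini_buffer=75, end_buffer=50, window_size=25):
--     # closed form: window-end index after i windows is ini_buffer + window_size*(2**i - 1) - 1
--     if tune_l < ini_buffer + end_buffer + window_size:
--         return "error"
--     limit = tune_l - end_buffer
--     q = -(-(limit - ini_buffer) // window_size) + 1      # ceil((limit-ini)/ws) + 1
--     k = (q - 1).bit_length()                             # smallest k >= 1 with 2**k >= q
--     return [ini_buffer + window_size * (2 ** i - 1) - 1 for i in range(1, k)] + [limit - 1]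
-- ===== Notes on version B (the rewrite author's own statement) =====
-- stated objective: alternative
-- what changed: Replaces the accumulate-and-overshoot doubling loop with a closed form: the number of windows k is computed by integer ceiling division plus bit_length, and the output is built directly from the formula ini_buffer + window_size*(2**i - 1) - 1.
-- outside the precondition, e.g. on return_update_metric_ep_list(10, 75, 50, 25): A returns 'error', B returns 'error'; on return_update_metric_ep_list(125, 75, 50, 0): A returns [74], B raises ZeroDivisionError; on return_update_metric_ep_list(124, 75, 50, -1): A returns [73], B returns [73]
import Mathlib
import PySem

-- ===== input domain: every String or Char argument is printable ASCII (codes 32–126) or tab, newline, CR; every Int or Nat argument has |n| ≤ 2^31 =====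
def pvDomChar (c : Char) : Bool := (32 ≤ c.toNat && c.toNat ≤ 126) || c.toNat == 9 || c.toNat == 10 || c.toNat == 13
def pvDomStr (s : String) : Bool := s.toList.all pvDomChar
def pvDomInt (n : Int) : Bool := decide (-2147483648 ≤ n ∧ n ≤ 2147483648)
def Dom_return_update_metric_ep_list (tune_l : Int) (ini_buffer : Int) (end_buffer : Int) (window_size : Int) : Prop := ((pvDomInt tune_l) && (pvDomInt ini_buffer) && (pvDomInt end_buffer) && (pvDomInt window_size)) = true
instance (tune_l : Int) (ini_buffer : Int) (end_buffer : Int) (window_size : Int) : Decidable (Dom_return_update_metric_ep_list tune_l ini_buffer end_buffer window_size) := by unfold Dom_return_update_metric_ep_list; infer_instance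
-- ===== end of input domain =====

-- B replaces A's accumulate-and-overshoot doubling loop by a closed form (ceiling division +
-- bit_length give the window count, the output is built from the formula); alternative, not faster.


-- ===== PORT A =====
-- A's while-loop; the `cws ≤ 0` cut only totalises the function (Python diverges there;
-- Pre_ excludes it); on Pre_ the branch is never taken.
def goA (tune_l : Int) (end_buffer : Int) (counter : Int) (cws : Int) (acc : List Int) : List Int :=
  if _h : cws ≤ 0 then acc
  else
    if _h2 : tune_l - end_buffer ≤ counter + cws then acc ++ [tune_l - end_buffer - 1]
    else goA tune_l end_buffer (counter + cws) (cws * 2) (acc ++ [counter + cws - 1])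
termination_by (tune_l - end_buffer - counter).toNat
decreasing_by omega

def return_update_metric_ep_list (tune_l : Int) (ini_buffer : Int) (end_buffer : Int) (window_size : Int) : List Int :=
  if tune_l < ini_buffer + end_buffer + window_size then []  -- Python returns the STRING "error" here; excluded by Pre_
  else goA tune_l end_buffer ini_buffer window_size []

-- ===== PORT B =====
def return_update_metric_ep_list_alt (tune_l : Int) (ini_buffer : Int) (end_buffer : Int) (window_size : Int) : List Int :=
  if tune_l < ini_buffer + end_buffer + window_size then []  -- Python returns the STRING "error" here; excluded by Pre_
  else
    -- q = -(-(limit - ini_buffer) // window_size) + 1 ; k = (q - 1).bit_length()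
    ((PySem.List.pyRange 1
        (PySem.Int.bitLength (-(PySem.Int.floordiv (-(tune_l - end_buffer - ini_buffer)) window_size) + 1 - 1) : Int) 1).map
      (fun i => ini_buffer + window_size * (2 ^ i.toNat - 1) - 1)) ++ [tune_l - end_buffer - 1]

-- ===== PRECONDITION & SPEC =====
-- Pre_ excludes the guard case, where A returns the string "error" (not a List Int), and
-- nonpositive window_size, on which A's loop diverges except on degenerate boundary inputs
-- (tune_l = ini_buffer + end_buffer + window_size) where B's ceiling division raises
-- ZeroDivisionError (window_size = 0) or returns the same single-element list (window_size < 0).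
def Pre_return_update_metric_ep_list (tune_l : Int) (ini_buffer : Int) (end_buffer : Int) (window_size : Int) : Prop :=
  1 ≤ window_size ∧ ini_buffer + end_buffer + window_size ≤ tune_l
instance (tune_l : Int) (ini_buffer : Int) (end_buffer : Int) (window_size : Int) : Decidable (Pre_return_update_metric_ep_list tune_l ini_buffer end_buffer window_size) := by unfold Pre_return_update_metric_ep_list; infer_instance

def pvWitness_return_update_metric_ep_list : Int × Int × Int × Int := (200, 75, 50, 25)

def Spec_return_update_metric_ep_list (tune_l : Int) (ini_buffer : Int) (end_buffer : Int) (window_size : Int) (out : List Int) : Prop := out = return_update_metric_ep_list_alt tune_l ini_buffer end_buffer window_size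
instance (tune_l : Int) (ini_buffer : Int) (end_buffer : Int) (window_size : Int) (out : List Int) : Decidable (Spec_return_update_metric_ep_list tune_l ini_buffer end_buffer window_size out) := by unfold Spec_return_update_metric_ep_list; infer_instance

-- ===== CLAIM (what is proved, stated in full; the proofs are below) =====
def Claim_equal_return_update_metric_ep_list : Prop := ∀ (tune_l : Int) (ini_buffer : Int) (end_buffer : Int) (window_size : Int), Dom_return_update_metric_ep_list tune_l ini_buffer end_buffer window_size → Pre_return_update_metric_ep_list tune_l ini_buffer end_buffer window_size → Spec_return_update_metric_ep_list tune_l ini_buffer end_buffer window_size (return_update_metric_ep_list tune_l ini_buffer end_buffer window_size)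

-- ===== LEMMAS AND PROOFS =====

-- After i iterations A's loop state is counter = ini + ws*(2^i - 1), cws = ws*2^i; given the
-- overshoot characterisation `hk`, the loop produces exactly the formula-indexed tail.
lemma goA_spec (tune_l ini end_b ws : Int) (k : Nat) (hws : 1 ≤ ws)
    (hk : ∀ j : Nat, tune_l - end_b ≤ ini + ws * ((2:Int) ^ j - 1) ↔ k ≤ j) :
    ∀ (n i : Nat) (acc : List Int), k - i ≤ n → i < k →
      goA tune_l end_b (ini + ws * ((2:Int) ^ i - 1)) (ws * 2 ^ i) acc
        = acc ++ ((List.range' (i+1) (k - (i+1))).map (fun j => ini + ws * ((2:Int) ^ j - 1) - 1))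
              ++ [tune_l - end_b - 1] := by
  intro n
  induction n with
  | zero => intro i acc h1 h2; omega
  | succ n ih =>
    intro i acc h1 h2
    have hw0 : (0 : Int) < ws := by omega
    have hcws : ¬ (ws * 2 ^ i ≤ 0) := by
      have : (0:Int) < ws * 2 ^ i := mul_pos hw0 (by positivity)
      omega
    have hc' : ini + ws * ((2:Int) ^ i - 1) + ws * 2 ^ i = ini + ws * ((2:Int) ^ (i+1) - 1) := by
      ring
    by_cases hov : tune_l - end_b ≤ ini + ws * ((2:Int) ^ (i+1) - 1)
    · have hki : k ≤ i + 1 := (hk (i+1)).mp hov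
      rw [goA, dif_neg hcws, dif_pos (by rw [hc']; exact hov)]
      have h0 : k - (i+1) = 0 := by omega
      simp [h0]
    · have hik : i + 1 < k := by
        by_contra hcon
        exact hov ((hk (i+1)).mpr (by omega))
      rw [goA, dif_neg hcws, dif_neg (by rw [hc']; exact hov)]
      rw [hc']
      have hcw2 : ws * 2 ^ i * 2 = ws * 2 ^ (i+1) := by ring
      rw [hcw2, ih (i+1) (acc ++ [ini + ws * ((2:Int) ^ (i+1) - 1) - 1]) (by omega) hik]
      have hr : k - (i+1) = (k - (i+2)) + 1 := by omega
      rw [hr, List.range'_succ]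
      simp

theorem return_update_metric_ep_list_spec : Claim_equal_return_update_metric_ep_list := by
  intro t i e w _ hpre
  obtain ⟨hws, hg⟩ := hpre
  unfold Spec_return_update_metric_ep_list return_update_metric_ep_list return_update_metric_ep_list_alt
  rw [if_neg (by omega), if_neg (by omega)]
  have hw0 : (0 : Int) < w := by omega
  set m : Int := -(PySem.Int.floordiv (-(t - e - i)) w) with hmdef
  have hm : (m - 1) * w < t - e - i ∧ t - e - i ≤ m * w :=
    (PySem.Int.neg_floordiv_neg_eq_iff_of_pos hw0).mp rfl
  have hL : w ≤ t - e - i := by omega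
  have hm1 : 1 ≤ m := by nlinarith [hm.2]
  set k : Nat := PySem.Int.bitLength m with hkdef
  have hmabs : (m.natAbs : Int) = m := Int.natAbs_of_nonneg (by omega)
  have hmlt : m < 2 ^ k := by
    have := PySem.Int.lt_two_pow_bitLength m
    calc m = (m.natAbs : Int) := hmabs.symm
      _ < ((2 ^ k : Nat) : Int) := by exact_mod_cast this
      _ = 2 ^ k := by push_cast; ring
  have hmge : (2:Int) ^ (k - 1) ≤ m := by
    have := PySem.Int.two_pow_bitLength_le m (by omega)
    calc (2:Int) ^ (k-1) = ((2 ^ (k-1) : Nat) : Int) := by push_cast; ring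
      _ ≤ (m.natAbs : Int) := by exact_mod_cast this
      _ = m := hmabs
  have hk1 : 1 ≤ k := by
    by_contra hcon
    have hk0 : k = 0 := by omega
    rw [hk0] at hmlt
    omega
  have hk : ∀ j : Nat, t - e ≤ i + w * ((2:Int) ^ j - 1) ↔ k ≤ j := by
    intro j
    constructor
    · intro hov
      by_contra hcon
      have hjk : j ≤ k - 1 := by omega
      have h2j : (2:Int) ^ j ≤ 2 ^ (k-1) := pow_le_pow_right₀ (by norm_num) hjk
      have : w * ((2:Int) ^ j - 1) ≤ w * (m - 1) :=
        mul_le_mul_of_nonneg_left (by omega) (by omega)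
      nlinarith [hm.1]
    · intro hkj
      have h2j : (2:Int) ^ k ≤ 2 ^ j := pow_le_pow_right₀ (by norm_num) hkj
      have : w * m ≤ w * ((2:Int) ^ j - 1) :=
        mul_le_mul_of_nonneg_left (by omega) (by omega)
      nlinarith [hm.2]
  have hstart : ¬ (k ≤ 0) := by omega
  have hA := goA_spec t i e w k hws hk k 0 [] (by omega) (by omega)
  norm_num at hA
  rw [hA]
  -- B side: pyRange → range
  have hq : m + 1 - 1 = m := by ring
  rw [hq, PySem.List.pyRange_one]
  have hcast : (((k:Int) - 1).toNat) = k - 1 := by omega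
  rw [hcast, List.range'_eq_map_range]
  simp only [List.map_map]
  congr 1
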